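-- pv_equiv track=rewrite | github.com/JoelBaiju/inticure_prime_backend | customer/utils/formatters.py | format_prescription_summary
-- ===== SOURCE A (Python) =====
-- def format_prescription_summary(prescriptions):
--     """Create a summary of prescriptions for display"""
--     summary = {
--         "total_doctors": len(prescriptions),
--         "total_medicines": sum(len(p.get('medicines', [])) for p in prescriptions),
--         "total_tests": sum(len(p.get('tests', [])) for p in prescriptions),
--         "total_notes": sum(len(p.get('notes', [])) for p in prescriptions),
--     }
--     return summary
-- ===== SOURCE B (Python) =====
-- def format_prescription_summary(prescriptions):
--     """Create a summary of prescriptions for display.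
--
--     Instead of querying each prescription for three field names, sweep the
--     items each prescription actually contains once and dispatch on the field
--     name into running counters."""
--     doctors = medicines = tests = notes = 0
--     for p in prescriptions:
--         doctors += 1
--         for field, value in p.items():
--             if field == 'medicines':
--                 medicines += len(value)
--             elif field == 'tests':
--                 tests += len(value)
--             elif field == 'notes':
--                 notes += len(value)
--     return {
--         "total_doctors": doctors,
--         "total_medicines": medicines,
--         "total_tests": tests,
--         "total_notes": notes,
--     }
-- ===== Notes on version B (the rewrite author's own statement) =====
-- stated objective: alternative
-- what changed: B never performs A's three keyed .get lookups: it sweeps each prescription's items once, dispatching on each field name present into running counters, while A does len() plus three independent generator-sum passes over the list.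
import Mathlib
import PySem

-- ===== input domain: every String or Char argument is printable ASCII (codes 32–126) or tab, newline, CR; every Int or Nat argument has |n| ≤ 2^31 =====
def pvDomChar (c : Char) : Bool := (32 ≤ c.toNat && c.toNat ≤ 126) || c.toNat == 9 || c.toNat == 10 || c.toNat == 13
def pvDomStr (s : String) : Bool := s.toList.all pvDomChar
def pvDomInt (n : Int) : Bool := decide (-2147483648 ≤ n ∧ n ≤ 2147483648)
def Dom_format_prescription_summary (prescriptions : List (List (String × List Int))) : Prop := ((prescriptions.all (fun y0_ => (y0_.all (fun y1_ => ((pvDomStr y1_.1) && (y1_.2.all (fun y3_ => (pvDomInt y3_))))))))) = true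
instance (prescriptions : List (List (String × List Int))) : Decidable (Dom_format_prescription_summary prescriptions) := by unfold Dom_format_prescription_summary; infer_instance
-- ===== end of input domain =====

-- ===== PORT A =====
-- B sweeps each prescription's items once, dispatching on the field name, instead of A's len() plus three keyed-lookup sums (objective: alternative).
def format_prescription_summary (prescriptions : List (List (String × List Int))) : List (String × Int) :=
  [("total_doctors", (prescriptions.length : Int)),
   ("total_medicines", (prescriptions.map (fun p => (((PySem.Dict.mk p).getD "medicines" []).length : Int))).sum),
   ("total_tests", (prescriptions.map (fun p => (((PySem.Dict.mk p).getD "tests" []).length : Int))).sum),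
   ("total_notes", (prescriptions.map (fun p => (((PySem.Dict.mk p).getD "notes" []).length : Int))).sum)]

-- ===== PORT B =====
-- p.items(): a Python dict holds each key once; under the assoc-list convention (lookup = first match)
-- the dict's items are the pairs whose key has not occurred earlier in the list.
def pvItems (seen : List String) : List (String × List Int) → List (String × List Int)
  | [] => []
  | (k, v) :: rest => if k ∈ seen then pvItems seen rest else (k, v) :: pvItems (k :: seen) rest

-- 'for field, value in p.items(): if/elif dispatch' over the counters (medicines, tests, notes)
def pvInner (items : List (String × List Int)) (s : Int × Int × Int) : Int × Int × Int :=
  items.foldl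
    (fun s fv =>
      if fv.1 = "medicines" then (s.1 + fv.2.length, s.2.1, s.2.2)
      else if fv.1 = "tests" then (s.1, s.2.1 + fv.2.length, s.2.2)
      else if fv.1 = "notes" then (s.1, s.2.1, s.2.2 + fv.2.length)
      else s) s

def format_prescription_summary_alt (prescriptions : List (List (String × List Int))) : List (String × Int) :=
  let acc := prescriptions.foldl
    (fun (s : Int × Int × Int × Int) p => (s.1 + 1, pvInner (pvItems [] p) s.2))
    (0, 0, 0, 0)
  [("total_doctors", acc.1),
   ("total_medicines", acc.2.1),
   ("total_tests", acc.2.2.1),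
   ("total_notes", acc.2.2.2)]

-- ===== PRECONDITION & SPEC =====
def Spec_format_prescription_summary (prescriptions : List (List (String × List Int))) (out : List (String × Int)) : Prop := out = format_prescription_summary_alt prescriptions
instance (prescriptions : List (List (String × List Int))) (out : List (String × Int)) : Decidable (Spec_format_prescription_summary prescriptions out) := by unfold Spec_format_prescription_summary; infer_instance

-- ===== CLAIM (what is proved, stated in full; the proofs are below) =====
def Claim_equal_format_prescription_summary : Prop := ∀ (prescriptions : List (List (String × List Int))), Dom_format_prescription_summary prescriptions → Spec_format_prescription_summary prescriptions (format_prescription_summary prescriptions)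

-- ===== LEMMAS AND PROOFS =====

-- total length contributed by the pairs of l carrying key k
def pvCnt (k : String) (l : List (String × List Int)) : Int :=
  ((l.filter (fun q => q.1 = k)).map (fun q => (q.2.length : Int))).sum

lemma pvCnt_nil (k : String) : pvCnt k [] = 0 := rfl

lemma pvCnt_cons (k : String) (q : String × List Int) (l : List (String × List Int)) :
    pvCnt k (q :: l) = (if q.1 = k then (q.2.length : Int) else 0) + pvCnt k l := by
  by_cases h : q.1 = k <;> simp [pvCnt, h]

lemma pvInner_eq (l : List (String × List Int)) (s : Int × Int × Int) :
    pvInner l s = (s.1 + pvCnt "medicines" l, s.2.1 + pvCnt "tests" l, s.2.2 + pvCnt "notes" l) := by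
  induction l generalizing s with
  | nil => simp [pvInner, pvCnt_nil]
  | cons q l ih =>
    rw [pvInner, List.foldl_cons, ← pvInner]
    rw [ih]
    by_cases h1 : q.1 = "medicines"
    · simp [h1, pvCnt_cons]; omega
    · by_cases h2 : q.1 = "tests"
      · simp [h2, pvCnt_cons]; omega
      · by_cases h3 : q.1 = "notes"
        · simp [h3, pvCnt_cons]; omega
        · simp [h1, h2, h3, pvCnt_cons]

-- A's lookup, first match
lemma dict_getD_cons (q : String × List Int) (l : List (String × List Int)) (k : String) :
    (PySem.Dict.mk (q :: l)).getD k [] = if q.1 = k then q.2 else (PySem.Dict.mk l).getD k [] := by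
  obtain ⟨k0, v0⟩ := q
  by_cases h : k0 = k <;>
    simp [PySem.Dict.getD_eq_get?_getD, PySem.Dict.get?_mk_cons, h]

lemma pvCnt_items (k : String) (l : List (String × List Int)) (seen : List String) :
    pvCnt k (pvItems seen l)
      = if k ∈ seen then 0 else (((PySem.Dict.mk l).getD k []).length : Int) := by
  induction l generalizing seen with
  | nil =>
    have h0 : (PySem.Dict.mk ([] : List (String × List Int))).getD k [] = [] := rfl
    simp [pvItems, pvCnt_nil, h0]
  | cons q l ih =>
    obtain ⟨k0, v0⟩ := q
    rw [pvItems, dict_getD_cons]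
    by_cases hs : k0 ∈ seen
    · rw [if_pos hs, ih]
      by_cases hk : k ∈ seen
      · simp [hk]
      · have hne : ¬ (k0 = k) := fun h => hk (h ▸ hs)
        simp [hk, hne]
    · rw [if_neg hs, pvCnt_cons, ih]
      by_cases hk : k ∈ seen
      · have hne : ¬ (k0 = k) := fun h => hs (h ▸ hk)
        simp [hk, hne]
      · by_cases he : k0 = k
        · subst he; simp [hk]
        · have he' : ¬ k = k0 := fun h => he h.symm
          simp [hk, he, he']

lemma pvCnt_items_nilSeen (k : String) (l : List (String × List Int)) :
    pvCnt k (pvItems [] l) = (((PySem.Dict.mk l).getD k []).length : Int) := by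
  rw [pvCnt_items]; simp

lemma fps_foldl (prescriptions : List (List (String × List Int))) (a b c d : Int) :
    prescriptions.foldl
      (fun (s : Int × Int × Int × Int) p => (s.1 + 1, pvInner (pvItems [] p) s.2))
      (a, b, c, d)
    = (a + prescriptions.length,
       b + (prescriptions.map (fun p => (((PySem.Dict.mk p).getD "medicines" []).length : Int))).sum,
       c + (prescriptions.map (fun p => (((PySem.Dict.mk p).getD "tests" []).length : Int))).sum,
       d + (prescriptions.map (fun p => (((PySem.Dict.mk p).getD "notes" []).length : Int))).sum) := by
  induction prescriptions generalizing a b c d with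
  | nil => simp
  | cons p ps ih =>
    rw [List.foldl_cons]
    have step : pvInner (pvItems [] p) (b, c, d)
        = (b + (((PySem.Dict.mk p).getD "medicines" []).length : Int),
           c + (((PySem.Dict.mk p).getD "tests" []).length : Int),
           d + (((PySem.Dict.mk p).getD "notes" []).length : Int)) := by
      rw [pvInner_eq]; simp [pvCnt_items_nilSeen]
    show List.foldl _ (a + 1, pvInner (pvItems [] p) (b, c, d)) ps = _
    rw [step, ih]
    simp [List.map_cons, List.sum_cons]
    refine ⟨by ring, by ring, by ring, by ring⟩

-- ===== VERDICT (by name: the statement is the Claim_ definition above) =====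
theorem format_prescription_summary_spec : Claim_equal_format_prescription_summary := by
  intro prescriptions _
  unfold Spec_format_prescription_summary format_prescription_summary format_prescription_summary_alt
  rw [fps_foldl]
  simp
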